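-- pv_equiv track=rewrite | github.com/harshsoni-harsh/CLAs | Sem_1/others/p.py | generate_3
-- ===== SOURCE A (Python) =====
-- def generate_3(words):
--     words.sort()
--     items=list(range(len(words)))
--     combination_1=[]
--     for i in items:
--         combination_1.append([i])
--     combination_2=[]
--     for i in combination_1:
--         for j in items:
--             if(j>i[-1]):
--                 combination_2.append(i+[j])
--     combination_3=[]
--     for i in combination_2:
--         for j in items:
--             if(j>i[-1]):
--                 combination_3.append(i+[j])
--     word_combinations=[]
--     for i in combination_3:
--         line=[]
--         for j in i:
--             line.append(words[j])
--         word_combinations.append(tuple(line))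
--     return sorted(set(word_combinations))
-- ===== SOURCE B (Python) =====
-- def generate_3(words):
--     words.sort()
--     n = len(words)
--     out = []
--     for i in range(n):
--         if i > 0 and words[i] == words[i - 1]:
--             continue
--         for j in range(i + 1, n):
--             if j > i + 1 and words[j] == words[j - 1]:
--                 continue
--             for k in range(j + 1, n):
--                 if k > j + 1 and words[k] == words[k - 1]:
--                     continue
--                 out.append((words[i], words[j], words[k]))
--     return out
-- ===== Notes on version B (the rewrite author's own statement) =====
-- stated objective: faster
-- what changed: A builds staged index-combination lists (each stage rescanning the full index list), materialises every C(n,3) word tuple, then deduplicates with set() and sorts; B sorts once and emits the unique triples directly in sorted order via nested loops that start past the previous index and skip duplicate values at each level, so no duplicate tuples are materialised and no set() or final sort is needed.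
import Mathlib
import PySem

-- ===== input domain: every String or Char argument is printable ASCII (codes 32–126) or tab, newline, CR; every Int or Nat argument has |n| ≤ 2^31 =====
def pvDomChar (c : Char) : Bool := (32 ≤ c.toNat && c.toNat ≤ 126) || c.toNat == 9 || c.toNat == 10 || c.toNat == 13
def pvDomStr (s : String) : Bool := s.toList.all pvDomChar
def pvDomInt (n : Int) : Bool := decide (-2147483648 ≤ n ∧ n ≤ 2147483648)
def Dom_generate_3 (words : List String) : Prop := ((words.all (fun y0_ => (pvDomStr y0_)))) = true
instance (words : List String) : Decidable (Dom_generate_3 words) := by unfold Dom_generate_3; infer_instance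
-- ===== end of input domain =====

-- B replaces A's staged combination lists + set() + final sort by sorted nested loops that skip
-- duplicate values at each level, emitting the unique triples already in sorted order (faster: no
-- duplicate materialisation, no set, no final sort). Both A and B sort the argument list in place
-- (the equivalence proved here is about the return value; the in-place sort is identical in both).

-- ===== PORT A =====
def generate_3 (words : List String) : List (List String) :=
  let ws := PySem.List.sorted words (fun x => x) false          -- words.sort()
  let items := PySem.List.pyRange 0 (ws.length : Int) 1         -- list(range(len(words)))
  let combination_1 := items.foldl (fun acc i => acc ++ [[i]]) []
  let combination_2 := combination_1.foldl (fun acc i =>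
      items.foldl (fun acc2 j =>
        -- Python 'if j > i[-1]': i is always nonempty here, so i[-1] never raises
        if (PySem.List.pyGet? i (-1)).getD 0 < j then acc2 ++ [i ++ [j]] else acc2) acc) []
  let combination_3 := combination_2.foldl (fun acc i =>
      items.foldl (fun acc2 j =>
        if (PySem.List.pyGet? i (-1)).getD 0 < j then acc2 ++ [i ++ [j]] else acc2) acc) []
  let word_combinations := combination_3.foldl (fun acc i =>
      acc ++ [i.foldl (fun line j => line ++ [PySem.List.pyGetD ws j ""]) []]) []
  PySem.List.sorted (PySem.Set.ofList word_combinations) (fun x => x) false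

-- ===== PORT B =====
def generate_3_alt (words : List String) : List (List String) :=
  let ws := PySem.List.sorted words (fun x => x) false          -- words.sort()
  let n : Int := ws.length
  (PySem.List.pyRange 0 n 1).foldl (fun out i =>
    if 0 < i ∧ PySem.List.pyGetD ws i "" = PySem.List.pyGetD ws (i - 1) "" then out
    else (PySem.List.pyRange (i + 1) n 1).foldl (fun out j =>
      if i + 1 < j ∧ PySem.List.pyGetD ws j "" = PySem.List.pyGetD ws (j - 1) "" then out
      else (PySem.List.pyRange (j + 1) n 1).foldl (fun out k =>
        if j + 1 < k ∧ PySem.List.pyGetD ws k "" = PySem.List.pyGetD ws (k - 1) "" then out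
        else out ++ [[PySem.List.pyGetD ws i "", PySem.List.pyGetD ws j "",
                      PySem.List.pyGetD ws k ""]]) out) out) []

-- ===== PRECONDITION & SPEC =====
def Spec_generate_3 (words : List String) (out : List (List String)) : Prop := out = generate_3_alt words
instance (words : List String) (out : List (List String)) : Decidable (Spec_generate_3 words out) := by unfold Spec_generate_3; infer_instance

-- ===== CLAIM (what is proved, stated in full; the proofs are below) =====
def Claim_equal_generate_3 : Prop := ∀ (words : List String), Dom_generate_3 words → Spec_generate_3 words (generate_3 words)

-- ===== LEMMAS AND PROOFS =====

def pvW (ws : List String) (i : Int) : String := PySem.List.pyGetD ws i ""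
def pvTri (ws : List String) : List (List String) :=
  (PySem.List.pyRange 0 (ws.length : Int) 1).flatMap fun i =>
    (PySem.List.pyRange (i + 1) (ws.length : Int) 1).flatMap fun j =>
      (PySem.List.pyRange (j + 1) (ws.length : Int) 1).map fun k =>
        [pvW ws i, pvW ws j, pvW ws k]

theorem pvFoldlIte {α β : Type} (p : α → Prop) [DecidablePred p] (f : α → β) (l : List α) (acc : List β) :
    l.foldl (fun acc x => if p x then acc ++ [f x] else acc) acc
      = acc ++ (l.filter (fun x => decide (p x))).map f := by
  induction l generalizing acc with
  | nil => simp
  | cons a t ih => by_cases h : p a <;> simp [h, ih]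

theorem pvFoldlSkip {α β : Type} (p : α → Prop) [DecidablePred p] (g : α → List β) (l : List α) (acc : List β) :
    l.foldl (fun acc x => if p x then acc else acc ++ g x) acc
      = acc ++ (l.filter (fun x => decide ¬ p x)).flatMap g := by
  induction l generalizing acc with
  | nil => simp
  | cons a t ih => by_cases h : p a <;> simp [h, ih]

theorem pvLast1 (x : Int) : (PySem.List.pyGet? [x] (-1)).getD 0 = x := by rfl
theorem pvLast2 (x y : Int) : (PySem.List.pyGet? [x, y] (-1)).getD 0 = y := by rfl

theorem pvFilterLt (i b : Int) : ∀ (k : Nat) (a : Int), (b - a).toNat = k → a ≤ i + 1 →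
    (PySem.List.pyRange a b).filter (fun j => decide (i < j)) = PySem.List.pyRange (i + 1) b := by
  intro k
  induction k with
  | zero =>
    intro a hk ha
    rw [PySem.List.pyRange_one_eq_nil (by omega), PySem.List.pyRange_one_eq_nil (by omega)]; rfl
  | succ k ih =>
    intro a hk ha
    have hab : a < b := by omega
    rw [PySem.List.pyRange_one_cons hab]
    by_cases hai : a ≤ i
    · have : ¬ (i < a) := by omega
      simp only [List.filter_cons, decide_eq_true_eq, if_neg this]
      exact ih (a+1) (by omega) (by omega)
    · have hA : a = i + 1 := by omega
      subst hA
      rw [← PySem.List.pyRange_one_cons hab]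
      apply List.filter_eq_self.mpr
      intro x hx
      have := PySem.List.mem_pyRange_one.mp hx
      simp; omega

-- the A-side combination step: one staged pass
theorem pvStep (items : List (List Int)) (univ : List Int) (acc : List (List Int)) :
    items.foldl (fun acc i =>
      univ.foldl (fun acc2 j =>
        if (PySem.List.pyGet? i (-1)).getD 0 < j then acc2 ++ [i ++ [j]] else acc2) acc) acc
    = acc ++ items.flatMap (fun i =>
        (univ.filter (fun j => decide ((PySem.List.pyGet? i (-1)).getD 0 < j))).map (fun j => i ++ [j])) := by
  have h : ∀ (a : List (List Int)) (i : List Int), i ∈ items →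
      univ.foldl (fun acc2 j =>
        if (PySem.List.pyGet? i (-1)).getD 0 < j then acc2 ++ [i ++ [j]] else acc2) a
      = a ++ (univ.filter (fun j => decide ((PySem.List.pyGet? i (-1)).getD 0 < j))).map (fun j => i ++ [j]) :=
    fun a i _ => pvFoldlIte _ _ _ _
  rw [PySem.List.foldl_congr_mem _ _ (fun acc i => acc ++ _) _ (fun a i hi => h a i hi)]
  exact PySem.List.foldl_append_eq_flatMap _ _ _

theorem pvA_norm' (words : List String) :
    (let ws := PySem.List.sorted words (fun x => x) false
     let items := PySem.List.pyRange 0 (ws.length : Int) 1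
     let combination_1 := items.foldl (fun acc i => acc ++ [[i]]) []
     let combination_2 := combination_1.foldl (fun acc i =>
         items.foldl (fun acc2 j =>
           if (PySem.List.pyGet? i (-1)).getD 0 < j then acc2 ++ [i ++ [j]] else acc2) acc) []
     let combination_3 := combination_2.foldl (fun acc i =>
         items.foldl (fun acc2 j =>
           if (PySem.List.pyGet? i (-1)).getD 0 < j then acc2 ++ [i ++ [j]] else acc2) acc) []
     let word_combinations := combination_3.foldl (fun acc i =>
         acc ++ [i.foldl (fun line j => line ++ [PySem.List.pyGetD ws j ""]) []]) []
     PySem.List.sorted (PySem.Set.ofList word_combinations) (fun x => x) false)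
    = PySem.List.sorted
        (PySem.Set.ofList (pvTri (PySem.List.sorted words (fun x => x) false)))
        (fun x => x) false := by
  set ws := PySem.List.sorted words (fun x => x) false with hws
  set items := PySem.List.pyRange 0 (ws.length : Int) 1 with hitems
  simp only []
  congr 1
  congr 1
  have e1 : items.foldl (fun acc i => acc ++ [[i]]) [] = items.map (fun i => [i]) := by
    simpa using PySem.List.foldl_append_singleton_eq_map (fun i : Int => [i]) items []
  rw [e1]
  have e2 : (items.map (fun i => [i])).foldl (fun acc i =>
      items.foldl (fun acc2 j =>
        if (PySem.List.pyGet? i (-1)).getD 0 < j then acc2 ++ [i ++ [j]] else acc2) acc) []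
      = items.flatMap (fun i => (PySem.List.pyRange (i + 1) (ws.length : Int) 1).map (fun j => [i, j])) := by
    rw [pvStep, List.nil_append, List.flatMap_map]
    apply List.flatMap_congr
    intro i hi
    have hi0 : 0 ≤ i := (PySem.List.mem_pyRange_one.mp (hitems ▸ hi)).1
    simp only [pvLast1]
    rw [hitems, pvFilterLt i (ws.length : Int) _ 0 rfl (by omega)]
    rfl
  rw [e2]
  have e3 : (items.flatMap (fun i => (PySem.List.pyRange (i + 1) (ws.length : Int) 1).map (fun j => [i, j]))).foldl
      (fun acc i => items.foldl (fun acc2 j =>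
        if (PySem.List.pyGet? i (-1)).getD 0 < j then acc2 ++ [i ++ [j]] else acc2) acc) []
      = items.flatMap (fun i => (PySem.List.pyRange (i + 1) (ws.length : Int) 1).flatMap (fun j =>
          (PySem.List.pyRange (j + 1) (ws.length : Int) 1).map (fun k => [i, j, k]))) := by
    rw [pvStep, List.nil_append, List.flatMap_assoc]
    apply List.flatMap_congr
    intro i hi
    have hi0 : 0 ≤ i := (PySem.List.mem_pyRange_one.mp (hitems ▸ hi)).1
    rw [List.flatMap_map]
    apply List.flatMap_congr
    intro j hj
    have hj0 : 0 ≤ j := by have := (PySem.List.mem_pyRange_one.mp hj).1; omega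
    simp only [pvLast2]
    rw [hitems, pvFilterLt j (ws.length : Int) _ 0 rfl (by omega)]
    simp
  rw [e3]
  have e4 : ∀ (t : List Int), t.foldl (fun line j => line ++ [PySem.List.pyGetD ws j ""]) []
      = t.map (fun j => PySem.List.pyGetD ws j "") := by
    intro t; simpa using PySem.List.foldl_append_singleton_eq_map (fun j : Int => PySem.List.pyGetD ws j "") t []
  have e5 : ∀ (l : List (List Int)), l.foldl (fun acc i =>
      acc ++ [i.foldl (fun line j => line ++ [PySem.List.pyGetD ws j ""]) []]) []
      = l.map (fun i => i.map (fun j => PySem.List.pyGetD ws j "")) := by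
    intro l
    have := PySem.List.foldl_append_singleton_eq_map
      (fun i : List Int => i.foldl (fun line j => line ++ [PySem.List.pyGetD ws j ""]) []) l []
    rw [this, List.nil_append]
    exact List.map_congr_left (fun t _ => e4 t)
  rw [e5]
  unfold pvTri
  simp [List.map_flatMap, pvW, Function.comp_def, hitems]

def pvKeep (ws : List String) (lo i : Int) : Bool :=
  decide ¬ (lo < i ∧ PySem.List.pyGetD ws i "" = PySem.List.pyGetD ws (i - 1) "")

theorem pvKeep_eq (ws : List String) (lo : Int) :
    (fun x => !decide (lo < x) || !decide (PySem.List.pyGetD ws x "" = PySem.List.pyGetD ws (x - 1) ""))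
      = pvKeep ws lo := by
  funext x; simp [pvKeep]

def pvTriK (ws : List String) : List (List String) :=
  ((PySem.List.pyRange 0 (ws.length : Int) 1).filter (pvKeep ws 0)).flatMap fun i =>
    ((PySem.List.pyRange (i + 1) (ws.length : Int) 1).filter (pvKeep ws (i + 1))).flatMap fun j =>
      ((PySem.List.pyRange (j + 1) (ws.length : Int) 1).filter (pvKeep ws (j + 1))).map fun k =>
        [pvW ws i, pvW ws j, pvW ws k]

theorem pvB_norm' (words : List String) :
    (let ws := PySem.List.sorted words (fun x => x) false
     let n : Int := ws.length
     (PySem.List.pyRange 0 n 1).foldl (fun out i =>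
       if 0 < i ∧ PySem.List.pyGetD ws i "" = PySem.List.pyGetD ws (i - 1) "" then out
       else (PySem.List.pyRange (i + 1) n 1).foldl (fun out j =>
         if i + 1 < j ∧ PySem.List.pyGetD ws j "" = PySem.List.pyGetD ws (j - 1) "" then out
         else (PySem.List.pyRange (j + 1) n 1).foldl (fun out k =>
           if j + 1 < k ∧ PySem.List.pyGetD ws k "" = PySem.List.pyGetD ws (k - 1) "" then out
           else out ++ [[PySem.List.pyGetD ws i "", PySem.List.pyGetD ws j "",
                         PySem.List.pyGetD ws k ""]]) out) out) [])
    = pvTriK (PySem.List.sorted words (fun x => x) false) := by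
  set ws := PySem.List.sorted words (fun x => x) false with hws
  simp only []
  have eInner : ∀ (i j : Int) (acc : List (List String)),
      (PySem.List.pyRange (j + 1) (ws.length : Int) 1).foldl (fun out k =>
        if j + 1 < k ∧ PySem.List.pyGetD ws k "" = PySem.List.pyGetD ws (k - 1) "" then out
        else out ++ [[PySem.List.pyGetD ws i "", PySem.List.pyGetD ws j "",
                      PySem.List.pyGetD ws k ""]]) acc
      = acc ++ ((PySem.List.pyRange (j + 1) (ws.length : Int) 1).filter (pvKeep ws (j + 1))).map
          (fun k => [pvW ws i, pvW ws j, pvW ws k]) := by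
    intro i j acc
    rw [pvFoldlSkip (fun k => j + 1 < k ∧ PySem.List.pyGetD ws k "" = PySem.List.pyGetD ws (k - 1) "")
      (fun k => [[PySem.List.pyGetD ws i "", PySem.List.pyGetD ws j "", PySem.List.pyGetD ws k ""]])]
    simp only [pvW, ← List.map_eq_flatMap]
    rfl
  have eMid : ∀ (i : Int) (acc : List (List String)),
      (PySem.List.pyRange (i + 1) (ws.length : Int) 1).foldl (fun out j =>
        if i + 1 < j ∧ PySem.List.pyGetD ws j "" = PySem.List.pyGetD ws (j - 1) "" then out
        else (PySem.List.pyRange (j + 1) (ws.length : Int) 1).foldl (fun out k =>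
          if j + 1 < k ∧ PySem.List.pyGetD ws k "" = PySem.List.pyGetD ws (k - 1) "" then out
          else out ++ [[PySem.List.pyGetD ws i "", PySem.List.pyGetD ws j "",
                        PySem.List.pyGetD ws k ""]]) out) acc
      = acc ++ ((PySem.List.pyRange (i + 1) (ws.length : Int) 1).filter (pvKeep ws (i + 1))).flatMap
          (fun j => ((PySem.List.pyRange (j + 1) (ws.length : Int) 1).filter (pvKeep ws (j + 1))).map
            (fun k => [pvW ws i, pvW ws j, pvW ws k])) := by
    intro i acc
    rw [PySem.List.foldl_congr_mem _ _
      (fun out j => if i + 1 < j ∧ PySem.List.pyGetD ws j "" = PySem.List.pyGetD ws (j - 1) "" then out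
        else out ++ ((PySem.List.pyRange (j + 1) (ws.length : Int) 1).filter (pvKeep ws (j + 1))).map
          (fun k => [pvW ws i, pvW ws j, pvW ws k])) _
      (by intro acc2 j _; by_cases h : i + 1 < j ∧ PySem.List.pyGetD ws j "" = PySem.List.pyGetD ws (j - 1) ""
          · simp only [if_pos h]
          · simp only [if_neg h, eInner i j acc2])]
    rw [pvFoldlSkip]
    simp [pvKeep_eq]
  rw [PySem.List.foldl_congr_mem _ _
    (fun out i => if 0 < i ∧ PySem.List.pyGetD ws i "" = PySem.List.pyGetD ws (i - 1) "" then out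
      else out ++ ((PySem.List.pyRange (i + 1) (ws.length : Int) 1).filter (pvKeep ws (i + 1))).flatMap
        (fun j => ((PySem.List.pyRange (j + 1) (ws.length : Int) 1).filter (pvKeep ws (j + 1))).map
          (fun k => [pvW ws i, pvW ws j, pvW ws k]))) _
    (by intro acc i _; by_cases h : 0 < i ∧ PySem.List.pyGetD ws i "" = PySem.List.pyGetD ws (i - 1) ""
        · simp only [if_pos h]
        · simp only [if_neg h, eMid i acc])]
  rw [pvFoldlSkip]
  simp [pvTriK, pvKeep_eq]

theorem pvKeep_true_iff (ws : List String) (lo i : Int) :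
    pvKeep ws lo i = true ↔ ¬ (lo < i ∧ pvW ws i = pvW ws (i - 1)) := by
  unfold pvKeep pvW; exact decide_eq_true_iff

theorem pvMono (ws : List String) (hs : ws.Pairwise (· ≤ ·)) (i j : Int)
    (h0 : 0 ≤ i) (hij : i ≤ j) (hj : j < (ws.length : Int)) : pvW ws i ≤ pvW ws j := by
  have hiN : i.toNat < ws.length := by omega
  have hjN : j.toNat < ws.length := by omega
  unfold pvW
  rw [PySem.List.pyGetD_of_nonneg _ _ h0, PySem.List.pyGetD_of_nonneg _ _ (by omega),
    List.getD_eq_getElem _ _ hiN, List.getD_eq_getElem _ _ hjN]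
  rcases eq_or_lt_of_le hij with h | h
  · simp [h]
  · exact List.pairwise_iff_getElem.mp hs i.toNat j.toNat hiN hjN (by omega)

theorem pvStrict (ws : List String) (hs : ws.Pairwise (· ≤ ·)) (lo i i' : Int)
    (h0 : 0 ≤ i) (hlo : lo ≤ i) (hii : i < i') (hi' : i' < (ws.length : Int))
    (hk : pvKeep ws lo i' = true) : pvW ws i < pvW ws i' := by
  have hne : pvW ws i' ≠ pvW ws (i' - 1) := by
    have := (pvKeep_true_iff ws lo i').mp hk
    intro h; exact this ⟨by omega, h⟩
  have h1 : pvW ws i ≤ pvW ws (i' - 1) := pvMono ws hs i (i' - 1) h0 (by omega) (by omega)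
  have h2 : pvW ws (i' - 1) ≤ pvW ws i' := pvMono ws hs (i' - 1) i' (by omega) (by omega) hi'
  exact lt_of_le_of_lt h1 (lt_of_le_of_ne h2 (fun h => hne h.symm))

theorem pvRep (ws : List String) (lo : Int) :
    ∀ (m : Nat) (x : Int), x = lo + m → x < (ws.length : Int) →
    ∃ y, lo ≤ y ∧ y ≤ x ∧ pvW ws y = pvW ws x ∧ pvKeep ws lo y = true := by
  intro m
  induction m with
  | zero =>
    intro x hx _
    exact ⟨x, by omega, le_refl x, rfl, (pvKeep_true_iff ws lo x).mpr (fun h => by omega)⟩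
  | succ m ih =>
    intro x hx hxn
    by_cases hk : pvKeep ws lo x = true
    · exact ⟨x, by omega, le_refl x, rfl, hk⟩
    · have h' : lo < x ∧ pvW ws x = pvW ws (x - 1) := by
        by_contra h; exact hk ((pvKeep_true_iff ws lo x).mpr h)
      obtain ⟨y, h1, h2, h3, h4⟩ := ih (x - 1) (by omega) (by omega)
      exact ⟨y, h1, by omega, by rw [h3, ← h'.2], h4⟩

-- lexicographic step lemmas for length-3 lists
theorem pvLex1 {a b c a' b' c' : String} (h : a < a') : [a, b, c] < [a', b', c'] :=
  List.cons_lt_cons_iff.mpr (Or.inl h)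
theorem pvLex2 {a b c b' c' : String} (h : b < b') : [a, b, c] < [a, b', c'] :=
  List.cons_lt_cons_iff.mpr (Or.inr ⟨rfl, List.cons_lt_cons_iff.mpr (Or.inl h)⟩)
theorem pvLex3 {a b c c' : String} (h : c < c') : [a, b, c] < [a, b, c'] :=
  List.cons_lt_cons_iff.mpr (Or.inr ⟨rfl, List.cons_lt_cons_iff.mpr (Or.inr ⟨rfl, List.cons_lt_cons_iff.mpr (Or.inl h)⟩)⟩)

theorem pvTriK_pairwise (ws : List String) (hs : ws.Pairwise (· ≤ ·)) :
    (pvTriK ws).Pairwise (· < ·) := by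
  unfold pvTriK
  rw [List.pairwise_flatMap]
  constructor
  · intro i hi
    rw [List.pairwise_flatMap]
    constructor
    · intro j hj
      rw [List.pairwise_map]
      refine List.Pairwise.imp_of_mem ?_ ((PySem.List.pairwise_lt_pyRange_one _ _).filter _)
      intro k k' hk hk' hlt
      have m1 := List.mem_filter.mp hk
      have m2 := List.mem_filter.mp hk'
      have r1 := PySem.List.mem_pyRange_one.mp m1.1
      have r2 := PySem.List.mem_pyRange_one.mp m2.1
      have hj0 : 0 ≤ j := by
        have := (PySem.List.mem_pyRange_one.mp (List.mem_filter.mp hj).1).1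
        have := (PySem.List.mem_pyRange_one.mp (List.mem_filter.mp hi).1).1
        omega
      exact pvLex3 (pvStrict ws hs (j + 1) k k' (by omega) r1.1 hlt r2.2 m2.2)
    · refine List.Pairwise.imp_of_mem ?_ ((PySem.List.pairwise_lt_pyRange_one _ _).filter _)
      intro j j' hj hj' hlt x hx y hy
      have m2 := List.mem_filter.mp hj'
      have r1 := PySem.List.mem_pyRange_one.mp (List.mem_filter.mp hj).1
      have r2 := PySem.List.mem_pyRange_one.mp m2.1
      have hi0 : 0 ≤ i := by
        have := (PySem.List.mem_pyRange_one.mp (List.mem_filter.mp hi).1).1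
        omega
      obtain ⟨k, hk, rfl⟩ := List.mem_map.mp hx
      obtain ⟨k', hk', rfl⟩ := List.mem_map.mp hy
      exact pvLex2 (pvStrict ws hs (i + 1) j j' (by omega) r1.1 hlt r2.2 m2.2)
  · refine List.Pairwise.imp_of_mem ?_ ((PySem.List.pairwise_lt_pyRange_one _ _).filter _)
    intro i i' hi hi' hlt x hx y hy
    have m2 := List.mem_filter.mp hi'
    have r1 := PySem.List.mem_pyRange_one.mp (List.mem_filter.mp hi).1
    have r2 := PySem.List.mem_pyRange_one.mp m2.1
    obtain ⟨j, hj, hx2⟩ := List.mem_flatMap.mp hx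
    obtain ⟨k, hk, rfl⟩ := List.mem_map.mp hx2
    obtain ⟨j', hj', hy2⟩ := List.mem_flatMap.mp hy
    obtain ⟨k', hk', rfl⟩ := List.mem_map.mp hy2
    exact pvLex1 (pvStrict ws hs 0 i i' r1.1 r1.1 hlt r2.2 m2.2)

theorem pvMem (ws : List String) (x : List String) :
    x ∈ pvTriK ws ↔ x ∈ pvTri ws := by
  unfold pvTriK pvTri
  simp only [List.mem_flatMap, List.mem_map, List.mem_filter, PySem.List.mem_pyRange_one]
  constructor
  · rintro ⟨i, ⟨⟨hi0, hin⟩, _⟩, j, ⟨⟨hj1, hj2⟩, _⟩, k, ⟨⟨hk1, hk2⟩, _⟩, rfl⟩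
    exact ⟨i, ⟨hi0, hin⟩, j, ⟨hj1, hj2⟩, k, ⟨hk1, hk2⟩, rfl⟩
  · rintro ⟨i, ⟨hi0, hin⟩, j, ⟨hj1, hj2⟩, k, ⟨hk1, hk2⟩, rfl⟩
    obtain ⟨i0, hA1, hA2, hA3, hA4⟩ := pvRep ws 0 i.toNat i (by omega) (by omega)
    obtain ⟨j0, hB1, hB2, hB3, hB4⟩ := pvRep ws (i0 + 1) (j - (i0+1)).toNat j (by omega) (by omega)
    obtain ⟨k0, hC1, hC2, hC3, hC4⟩ := pvRep ws (j0 + 1) (k - (j0+1)).toNat k (by omega) (by omega)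
    exact ⟨i0, ⟨⟨by omega, by omega⟩, hA4⟩, j0, ⟨⟨hB1, by omega⟩, hB4⟩, k0, ⟨⟨hC1, by omega⟩, hC4⟩,
      by rw [hA3, hB3, hC3]⟩

theorem pvMain (ws : List String) (hs : ws.Pairwise (· ≤ ·)) :
    PySem.List.sorted (PySem.Set.ofList (pvTri ws)) (fun x => x) false = pvTriK ws := by
  have hd : (fun (a b : List String) => a.decidableLT b)
      = (fun a b => @LinearOrder.toDecidableLT _ List.instLinearOrder a b) := by
    funext a b; exact Subsingleton.elim _ _
  rw [hd]
  refine PySem.List.sorted_eq_of_perm_of_pairwise_lt _ _ (fun x => x) ?_ ?_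
  · rw [List.perm_ext_iff_of_nodup
      ((pvTriK_pairwise ws hs).imp (fun h => ne_of_lt h)) (PySem.Set.nodup_ofList _)]
    intro a
    rw [PySem.Set.mem_ofList]
    exact pvMem ws a
  · exact pvTriK_pairwise ws hs

theorem pvA_norm (words : List String) :
    generate_3 words =
      PySem.List.sorted
        (PySem.Set.ofList (pvTri (PySem.List.sorted words (fun x => x) false)))
        (fun x => x) false := by
  unfold generate_3; exact pvA_norm' words

theorem pvB_norm (words : List String) :
    generate_3_alt words = pvTriK (PySem.List.sorted words (fun x => x) false) := by
  unfold generate_3_alt; exact pvB_norm' words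

-- ===== VERDICT (by name: the statement is the Claim_ definition above) =====
theorem generate_3_spec : Claim_equal_generate_3 := by
  intro words _
  unfold Spec_generate_3
  rw [pvA_norm, pvB_norm, pvMain]
  have := PySem.List.sorted_pairwise words (fun x => x)
  simpa using this
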